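-- pv_equiv track=rewrite | github.com/devaljain1998/dsaPractice | Competitions/CodeForces/EducationalRound95/buying_torches.py | get_minimum_trades
-- ===== SOURCE A (Python) =====
-- def get_minimum_trades(x: int, y: int, k: int):
--     trades = 0
--     sticks = 1
--     coals = 0
--     while (True):
--         if sticks >= k and coals >= k:
--             break
--         elif sticks < k:
--             sticks +=  -1 + x
--         elif coals < k:
--             sticks -= y
--             coals += 1
--
--         trades += 1
--     return trades
-- ===== SOURCE B (Python) =====
-- def get_minimum_trades(x: int, y: int, k: int):
--     # Closed form: k coal trades, plus just enough stick trades (each nets x-1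
--     # sticks) to cover the peak stick demand k-1 + k*max(y,0); if no extra
--     # sticks are needed, only the k coal trades are performed.
--     if k <= 0:
--         return 0
--     need = k - 1 + k * max(y, 0)
--     if need <= 0:
--         return k
--     return -(-need // (x - 1)) + k
-- ===== Notes on version B (the rewrite author's own statement) =====
-- stated objective: faster
-- what changed: Replaces the trade-by-trade simulation loop with a closed-form ceiling-division formula: k coal trades plus ceil((k-1+k*max(y,0))/(x-1)) stick trades (zero stick trades when none are needed).
import Mathlib
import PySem

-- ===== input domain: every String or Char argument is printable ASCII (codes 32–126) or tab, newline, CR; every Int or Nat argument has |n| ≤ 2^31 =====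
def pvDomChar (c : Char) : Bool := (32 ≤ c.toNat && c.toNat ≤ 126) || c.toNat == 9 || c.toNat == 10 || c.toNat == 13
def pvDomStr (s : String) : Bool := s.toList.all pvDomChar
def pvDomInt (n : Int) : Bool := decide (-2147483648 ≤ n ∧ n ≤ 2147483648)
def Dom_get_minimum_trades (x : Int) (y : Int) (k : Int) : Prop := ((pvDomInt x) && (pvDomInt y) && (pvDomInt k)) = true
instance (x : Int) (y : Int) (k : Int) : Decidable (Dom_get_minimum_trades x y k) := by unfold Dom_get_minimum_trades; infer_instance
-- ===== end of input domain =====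

-- B replaces A's trade-by-trade simulation loop with an O(1) ceiling-division closed form (objective: faster).

-- ===== PORT A =====
-- A's `while True` loop, ported with a fuel parameter; under Pre_ the fuel pvFuelA y k
-- is proved sufficient, so it is never exhausted on admitted inputs.
def pvLoopA (x : Int) (y : Int) (k : Int) : Nat → Int → Int → Int → Int
  | 0, trades, _, _ => trades
  | fuel + 1, trades, sticks, coals =>
    if sticks ≥ k ∧ coals ≥ k then trades
    else if sticks < k then pvLoopA x y k fuel (trades + 1) (sticks + (-1 + x)) coals
    else if coals < k then pvLoopA x y k fuel (trades + 1) (sticks - y) (coals + 1)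
    else pvLoopA x y k fuel (trades + 1) sticks coals  -- Python's fall-through: trades += 1, loop again

def pvFuelA (y : Int) (k : Int) : Nat := 2 * k.toNat + k.toNat * y.toNat + 2

def get_minimum_trades (x : Int) (y : Int) (k : Int) : Int :=
  pvLoopA x y k (pvFuelA y k) 0 1 0

-- ===== PORT B =====
def get_minimum_trades_alt (x : Int) (y : Int) (k : Int) : Int :=
  if k ≤ 0 then 0
  else
    let need := k - 1 + k * max y 0
    if need ≤ 0 then k
    else -(PySem.Int.floordiv (-need) (x - 1)) + k

-- ===== PRECONDITION & SPEC =====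
-- Pre_ excludes exactly the inputs on which A never returns: x ≤ 1 with k ≥ 1,
-- except the corner k = 1 ∧ y ≤ 0 where the loop still terminates (and is admitted).
def Pre_get_minimum_trades (x : Int) (y : Int) (k : Int) : Prop :=
  k ≤ 0 ∨ 2 ≤ x ∨ (k = 1 ∧ y ≤ 0)
instance (x : Int) (y : Int) (k : Int) : Decidable (Pre_get_minimum_trades x y k) := by
  unfold Pre_get_minimum_trades; infer_instance

def pvWitness_get_minimum_trades : Int × Int × Int := (2, 1, 5)

def Spec_get_minimum_trades (x : Int) (y : Int) (k : Int) (out : Int) : Prop := out = get_minimum_trades_alt x y k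
instance (x : Int) (y : Int) (k : Int) (out : Int) : Decidable (Spec_get_minimum_trades x y k out) := by unfold Spec_get_minimum_trades; infer_instance

-- ===== CLAIM (what is proved, stated in full; the proofs are below) =====
def Claim_equal_get_minimum_trades : Prop := ∀ (x : Int) (y : Int) (k : Int), Dom_get_minimum_trades x y k → Pre_get_minimum_trades x y k → Spec_get_minimum_trades x y k (get_minimum_trades x y k)

-- ===== LEMMAS AND PROOFS =====

-- ceiling division d / w, written exactly as B writes it
def pvCeil (w : Int) (d : Int) : Int := -(PySem.Int.floordiv (-d) w)

lemma pvCeil_bracket (w d : Int) (hw : 0 < w) :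
    (pvCeil w d - 1) * w < d ∧ d ≤ pvCeil w d * w :=
  (PySem.Int.neg_floordiv_neg_eq_iff_of_pos hw).mp rfl

lemma pvCeil_eq (w d q : Int) (hw : 0 < w) (h1 : (q - 1) * w < d) (h2 : d ≤ q * w) :
    pvCeil w d = q :=
  (PySem.Int.neg_floordiv_neg_eq_iff_of_pos hw).mpr ⟨h1, h2⟩

lemma pvCeil_nonneg (w d : Int) (hw : 0 < w) (hd : 0 ≤ d) : 0 ≤ pvCeil w d := by
  rcases pvCeil_bracket w d hw with ⟨_, h2⟩
  nlinarith

lemma pvCeil_le_self (w d : Int) (hw : 0 < w) (hd : 0 ≤ d) : pvCeil w d ≤ d := by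
  rcases pvCeil_bracket w d hw with ⟨h1, _⟩
  nlinarith

lemma pvCeil_step (w D : Int) (hw : 0 < w) (hD : 0 < D) :
    pvCeil w (max 0 D) = 1 + pvCeil w (max 0 (D - w)) := by
  rw [max_eq_right hD.le]
  by_cases h : 0 < D - w
  · rw [max_eq_right h.le]
    rcases pvCeil_bracket w (D - w) hw with ⟨h1, h2⟩
    have := pvCeil_eq w D (pvCeil w (D - w) + 1) hw (by linarith) (by nlinarith)
    omega
  · rw [max_eq_left (by linarith)]
    have h0 : pvCeil w 0 = 0 := pvCeil_eq w 0 0 hw (by nlinarith) (by nlinarith)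
    have h1 : pvCeil w D = 1 := pvCeil_eq w D 1 hw (by nlinarith) (by nlinarith)
    omega

-- closed-form number of trades still needed from state (sticks = s, coals = c)
def pvG (x y k s c : Int) : Int :=
  (k - c) + pvCeil (x - 1) (max 0 (k - s + (k - c) * max y 0))

lemma pvG_nonneg (x y k s c : Int) (hx : 2 ≤ x) (hc : c ≤ k) : 0 ≤ pvG x y k s c := by
  have := pvCeil_nonneg (x - 1) (max 0 (k - s + (k - c) * max y 0)) (by omega) (le_max_left _ _)
  unfold pvG; omega

lemma pvLoopA_eq (x y k : Int) (hx : 2 ≤ x) :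
    ∀ (fuel : Nat) (t s c : Int), 0 ≤ c → c ≤ k → (pvG x y k s c).toNat ≤ fuel →
      pvLoopA x y k fuel t s c = t + pvG x y k s c := by
  intro fuel
  induction fuel with
  | zero =>
    intro t s c hc0 hck hfuel
    have hnn := pvG_nonneg x y k s c hx hck
    simp only [pvLoopA]
    omega
  | succ n ih =>
    intro t s c hc0 hck hfuel
    have hw : (0:Int) < x - 1 := by omega
    have hm : (0:Int) ≤ max y 0 := le_max_right _ _
    simp only [pvLoopA]
    by_cases hdone : s ≥ k ∧ c ≥ k
    · rw [if_pos hdone]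
      have hck' : c = k := le_antisymm hck hdone.2
      have hD : k - s + (k - c) * max y 0 ≤ 0 := by
        have : (k - c) * max y 0 = 0 := by rw [hck']; ring
        omega
      have : pvG x y k s c = 0 := by
        unfold pvG
        rw [max_eq_left hD]
        have h0 : pvCeil (x - 1) 0 = 0 := pvCeil_eq (x - 1) 0 0 hw (by nlinarith) (by nlinarith)
        omega
      omega
    · rw [if_neg hdone]
      by_cases hs : s < k
      · rw [if_pos hs]
        have hDpos : 0 < k - s + (k - c) * max y 0 := by nlinarith
        have hstep : pvG x y k s c = 1 + pvG x y k (s + (-1 + x)) c := by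
          have := pvCeil_step (x - 1) (k - s + (k - c) * max y 0) hw hDpos
          unfold pvG
          have harg : k - (s + (-1 + x)) + (k - c) * max y 0
              = (k - s + (k - c) * max y 0) - (x - 1) := by ring
          rw [harg]
          omega
        have hnn := pvG_nonneg x y k (s + (-1 + x)) c hx hck
        rw [ih (t + 1) (s + (-1 + x)) c hc0 hck (by omega)]
        omega
      · rw [if_neg hs]
        have hcK : c < k := by omega
        rw [if_pos hcK]
        have hstep : pvG x y k s c = 1 + pvG x y k (s - y) (c + 1) := by
          have harg : max 0 (k - s + (k - c) * max y 0)
              = max 0 (k - (s - y) + (k - (c + 1)) * max y 0) := by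
            by_cases hy : 0 ≤ y
            · rw [max_eq_left hy]
              congr 1
              ring
            · rw [max_eq_right (le_of_not_ge hy)]
              have h1 : k - s + (k - c) * 0 ≤ 0 := by omega
              have h2 : k - (s - y) + (k - (c + 1)) * 0 ≤ 0 := by omega
              rw [max_eq_left h1, max_eq_left h2]
          unfold pvG
          rw [harg]
          omega
        have hnn := pvG_nonneg x y k (s - y) (c + 1) hx (by omega)
        rw [ih (t + 1) (s - y) (c + 1) (by omega) (by omega) (by omega)]
        omega

-- ===== VERDICT (by name: the statement is the Claim_ definition above) =====
theorem get_minimum_trades_spec : Claim_equal_get_minimum_trades := by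
  intro x y k _ hpre
  unfold Spec_get_minimum_trades get_minimum_trades get_minimum_trades_alt
  by_cases hk : k ≤ 0
  · -- loop breaks immediately; B returns 0
    have hf : pvFuelA y k = (2 * k.toNat + k.toNat * y.toNat + 1) + 1 := by
      unfold pvFuelA; omega
    rw [hf]
    simp only [pvLoopA]
    rw [if_pos ⟨by omega, by omega⟩, if_pos hk]
  · have hk1 : 1 ≤ k := by omega
    rw [if_neg hk]
    simp only []
    by_cases hneed : k - 1 + k * max y 0 ≤ 0
    · -- no stick trades needed: k = 1 ∧ y ≤ 0, loop does exactly one coal trade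
      have hm : (0:Int) ≤ max y 0 := le_max_right _ _
      have hky : k = 1 ∧ y ≤ 0 := by
        constructor
        · nlinarith
        · by_contra hy
          have : max y 0 = y := max_eq_left (by omega)
          rw [this] at hneed
          nlinarith
      rcases hky with ⟨hk1', hy⟩
      subst hk1'
      have hy0 : y.toNat = 0 := by omega
      have hf : pvFuelA y 1 = 3 + 1 := by unfold pvFuelA; rw [hy0]; rfl
      rw [hf, if_pos hneed]
      simp only [pvLoopA]
      rw [if_neg (by omega), if_neg (by omega), if_pos (by omega),
          if_pos (by constructor <;> omega)]
      norm_num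
    · -- stick trades needed: Pre_ forces 2 ≤ x; use the loop invariant pvG
      have hx : 2 ≤ x := by
        rcases hpre with h | h | ⟨h1, h2⟩
        · omega
        · exact h
        · exfalso; apply hneed; subst h1; simp [max_eq_right h2]
      have hw : (0:Int) < x - 1 := by omega
      have hD0 : (0:Int) ≤ k - 1 + k * max y 0 := by omega
      have hle := pvCeil_le_self (x - 1) (k - 1 + k * max y 0) hw hD0
      have hnn := pvCeil_nonneg (x - 1) (k - 1 + k * max y 0) hw hD0
      have hmax : (↑y.toNat : Int) = max y 0 := Int.toNat_eq_max y
      have hkc : (↑k.toNat : Int) = k := by omega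
      have hcast : (↑(k.toNat * y.toNat) : Int) = k * max y 0 := by
        push_cast
        rw [hmax, hkc]
      have hGval : pvG x y k 1 0 = k + pvCeil (x - 1) (k - 1 + k * max y 0) := by
        unfold pvG
        simp only [sub_zero]
        rw [max_eq_right hD0]
      have hfuel : (pvG x y k 1 0).toNat ≤ pvFuelA y k := by
        unfold pvFuelA
        omega
      rw [if_neg hneed,
          pvLoopA_eq x y k hx (pvFuelA y k) 0 1 0 le_rfl (by omega) hfuel, hGval]
      show 0 + (k + pvCeil (x - 1) (k - 1 + k * max y 0)) = pvCeil (x - 1) (k - 1 + k * max y 0) + k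
      ring
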